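-- pv_equiv track=rewrite | github.com/jonamuswele/predictionmodel | flood_forecast_web.py | _river_alert_levels
-- ===== SOURCE A (Python) =====
-- from typing import Any, Dict, List, Optional, Tuple
--
-- def _river_alert_levels(recs: List[Dict[str, Any]]
--                         ) -> Dict[str, str]:
--     """Map lower-cased river name -> worst alert level across its gauges."""
--     rank = {"GREEN": 0, "AMBER": 1, "RED": 2}
--     worst: Dict[str, str] = {}
--     for r in recs:
--         river = (r.get("river") or "").strip().lower()
--         if not river:
--             continue
--         level = r.get("alert_level", "GREEN")
--         if river not in worst or rank[level] > rank[worst[river]]: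
--             worst[river] = level
--     return worst
-- ===== SOURCE B (Python) =====
-- from typing import Any, Dict, List
--
-- def _river_alert_levels(recs: List[Dict[str, Any]]) -> Dict[str, str]:
--     """Map lower-cased river name -> worst alert level across its gauges.
--
--     Two passes: group every river's levels in encounter order, then reduce
--     each group to its worst level.
--     """
--     rank = {"GREEN": 0, "AMBER": 1, "RED": 2}
--     groups: Dict[str, List[str]] = {}
--     for r in recs:
--         river = (r.get("river") or "").strip().lower()
--         if not river:
--             continue
--         groups[river] = groups.get(river, []) + [r.get("alert_level", "GREEN")]
--     out: Dict[str, str] = {}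
--     for river, levels in groups.items():
--         cur = levels[0]
--         for lv in levels[1:]:
--             if rank[lv] > rank[cur]:
--                 cur = lv
--         out[river] = cur
--     return out
-- ===== Notes on version B (the rewrite author's own statement) =====
-- stated objective: alternative
-- what changed: A keeps a running worst-level dict updated record by record; B first groups each river's alert levels into lists (one pass) and then reduces each group to its worst level (second pass).
import Mathlib
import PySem

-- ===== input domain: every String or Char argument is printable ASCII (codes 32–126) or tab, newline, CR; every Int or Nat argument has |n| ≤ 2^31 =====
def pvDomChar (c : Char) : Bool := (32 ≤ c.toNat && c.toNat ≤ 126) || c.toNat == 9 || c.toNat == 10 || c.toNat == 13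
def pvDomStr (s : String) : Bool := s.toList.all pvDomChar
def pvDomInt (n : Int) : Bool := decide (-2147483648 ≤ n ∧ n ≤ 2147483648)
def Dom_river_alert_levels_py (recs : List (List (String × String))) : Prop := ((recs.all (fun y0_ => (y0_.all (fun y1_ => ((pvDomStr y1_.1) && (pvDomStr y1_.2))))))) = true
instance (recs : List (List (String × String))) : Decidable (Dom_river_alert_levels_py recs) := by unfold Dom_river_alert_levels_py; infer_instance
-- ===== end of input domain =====

-- B groups each river's levels in one pass and then reduces each group to its worst level
-- (alternative decomposition, same cost); proved equal to A's single-pass running-maximum dict.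

-- shared helpers (both Pythons compute these same subexpressions)
-- rank = {"GREEN": 0, "AMBER": 1, "RED": 2}
def pvRank : PySem.Dict String Int := PySem.Dict.ofList [("GREEN", 0), ("AMBER", 1), ("RED", 2)]

-- rank[s]; Python raises KeyError on other strings — Pre_ excludes exactly those inputs, so getD 0 is exact on Pre_
def pvRk (s : String) : Int := PySem.Dict.getD pvRank s 0

-- (r.get("river") or "").strip().lower()
def pvNorm (r : List (String × String)) : String :=
  PySem.Str.lower (PySem.Str.strip (((PySem.Dict.mk r).get? "river").getD ""))

-- r.get("alert_level", "GREEN")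
def pvLevel (r : List (String × String)) : String :=
  PySem.Dict.getD (PySem.Dict.mk r) "alert_level" "GREEN"

-- ===== PORT A =====
-- loop body of A: one record updates the running worst-level dict
def pvStepA (worst : PySem.Dict String String) (r : List (String × String)) : PySem.Dict String String :=
  if pvNorm r = "" then worst
  else
    match worst.get? (pvNorm r) with
    | none => worst.insert (pvNorm r) (pvLevel r)
    | some cur =>
      if pvRk (pvLevel r) > pvRk cur then worst.insert (pvNorm r) (pvLevel r) else worst

def river_alert_levels_py (recs : List (List (String × String))) : List (String × String) :=
  (recs.foldl pvStepA PySem.Dict.empty).items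

-- ===== PORT B =====
-- loop body of B's first pass: append this record's level to its river's group
def pvStepG (g : PySem.Dict String (List String)) (r : List (String × String)) : PySem.Dict String (List String) :=
  if pvNorm r = "" then g
  else g.insert (pvNorm r) (g.getD (pvNorm r) [] ++ [pvLevel r])

-- B's second pass: reduce one group to its worst level (cur = levels[0]; the [] case is unreachable)
def pvWorstOf : List String → String
  | [] => ""
  | l :: ls => ls.foldl (fun cur x => if pvRk x > pvRk cur then x else cur) l

def river_alert_levels_py_alt (recs : List (List (String × String))) : List (String × String) :=
  let groups := recs.foldl pvStepG PySem.Dict.empty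
  (groups.items.foldl (fun out p => out.insert p.1 (pvWorstOf p.2)) PySem.Dict.empty).items

-- ===== PRECONDITION & SPEC =====
-- Python A raises KeyError exactly when some nonempty normalized river name occurs in two or
-- more records and any of that river's alert levels is not GREEN/AMBER/RED; Pre_ excludes
-- exactly those inputs (everywhere else A returns normally).
def Pre_river_alert_levels_py (recs : List (List (String × String))) : Prop :=
  ∀ r ∈ recs, pvNorm r ≠ "" → 2 ≤ (recs.map pvNorm).count (pvNorm r) →
    pvLevel r ∈ (["GREEN", "AMBER", "RED"] : List String)
instance (recs : List (List (String × String))) : Decidable (Pre_river_alert_levels_py recs) := by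
  unfold Pre_river_alert_levels_py; infer_instance

def pvWitness_river_alert_levels_py : (List (List (String × String))) :=
  [[("river", " Zambezi"), ("alert_level", "AMBER")], [("river", "zambezi"), ("alert_level", "RED")]]

def Spec_river_alert_levels_py (recs : List (List (String × String))) (out : List (String × String)) : Prop := out = river_alert_levels_py_alt recs
instance (recs : List (List (String × String))) (out : List (String × String)) : Decidable (Spec_river_alert_levels_py recs out) := by unfold Spec_river_alert_levels_py; infer_instance

-- ===== CLAIM (what is proved, stated in full; the proofs are below) =====
def Claim_equal_river_alert_levels_py : Prop := ∀ (recs : List (List (String × String))), Dom_river_alert_levels_py recs → Pre_river_alert_levels_py recs → Spec_river_alert_levels_py recs (river_alert_levels_py recs)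

-- ===== LEMMAS AND PROOFS =====

-- map a group dict to its worst-level dict (same keys, same positions)
def pvMapWorst (g : PySem.Dict String (List String)) : PySem.Dict String String :=
  PySem.Dict.mk (g.items.map (fun p => (p.1, pvWorstOf p.2)))

theorem pvGet?_mapWorst (l : List (String × List String)) (k : String) :
    (PySem.Dict.mk (l.map (fun p => (p.1, pvWorstOf p.2)))).get? k
      = ((PySem.Dict.mk l).get? k).map pvWorstOf := by
  induction l with
  | nil => rfl
  | cons p rest ih =>
    obtain ⟨a, b⟩ := p
    simp only [List.map_cons, PySem.Dict.get?_mk_cons]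
    split <;> simp [ih]

theorem pvWorstOf_append (ls : List String) (x : String) (h : ls ≠ []) :
    pvWorstOf (ls ++ [x]) = if pvRk x > pvRk (pvWorstOf ls) then x else pvWorstOf ls := by
  match ls with
  | [] => exact absurd rfl h
  | a :: as => simp [pvWorstOf, List.foldl_append]

theorem pvStepG_nodup (g : PySem.Dict String (List String)) (r : List (String × String))
    (h : g.keys.Nodup) : (pvStepG g r).keys.Nodup := by
  unfold pvStepG
  split
  · exact h
  · exact PySem.Dict.nodup_keys_insert _ _ _ h

theorem pvStepG_ne (g : PySem.Dict String (List String)) (r : List (String × String))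
    (h : ∀ p ∈ g.items, p.2 ≠ []) : ∀ p ∈ (pvStepG g r).items, p.2 ≠ [] := by
  unfold pvStepG
  split
  · exact h
  · intro p hp
    rcases (PySem.Dict.mem_items_insert _ _ _ _).1 hp with hh | hh
    · subst hh; simp
    · exact h p hh.1

theorem pvStep_comm (g : PySem.Dict String (List String)) (r : List (String × String))
    (h1 : g.keys.Nodup) (h2 : ∀ p ∈ g.items, p.2 ≠ []) :
    pvStepA (pvMapWorst g) r = pvMapWorst (pvStepG g r) := by
  unfold pvStepA pvStepG
  by_cases hr : pvNorm r = ""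
  · simp [hr]
  · simp only [hr, ite_false]
    have hget : (pvMapWorst g).get? (pvNorm r) = (g.get? (pvNorm r)).map pvWorstOf :=
      pvGet?_mapWorst g.items (pvNorm r)
    cases hg : g.get? (pvNorm r) with
    | none =>
      have hc : g.contains (pvNorm r) = false := by
        rw [PySem.Dict.contains_eq_isSome_get?, hg]; rfl
      have hc' : (pvMapWorst g).contains (pvNorm r) = false := by
        rw [PySem.Dict.contains_eq_isSome_get?, hget, hg]; rfl
      rw [hget, hg]
      simp only [Option.map_none]
      rw [PySem.Dict.getD_of_get?_eq_none g [] hg]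
      apply PySem.Dict.ext
      rw [PySem.Dict.items_insert_of_not_contains _ _ hc']
      unfold pvMapWorst
      rw [PySem.Dict.items_insert_of_not_contains _ _ hc]
      simp [pvWorstOf]
    | some ls =>
      have hls : ls ≠ [] := h2 _ (PySem.Dict.mem_items_of_get?_eq_some g hg)
      have hc : g.contains (pvNorm r) = true := by
        rw [PySem.Dict.contains_eq_isSome_get?, hg]; rfl
      have hc' : (pvMapWorst g).contains (pvNorm r) = true := by
        rw [PySem.Dict.contains_eq_isSome_get?, hget, hg]; rfl
      rw [hget, hg]
      simp only [Option.map_some]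
      rw [PySem.Dict.getD_of_get?_eq_some g [] hg]
      by_cases c : pvRk (pvLevel r) > pvRk (pvWorstOf ls)
      · simp only [c, if_pos]
        apply PySem.Dict.ext
        rw [PySem.Dict.items_insert_of_contains _ _ hc']
        unfold pvMapWorst
        rw [PySem.Dict.items_insert_of_contains _ _ hc]
        rw [List.map_map, List.map_map]
        apply List.map_congr_left
        intro p _
        by_cases hp : p.1 = pvNorm r
        · simp [hp, pvWorstOf_append ls _ hls, c]
        · simp [hp]
      · simp only [c, ite_false]
        apply PySem.Dict.ext
        unfold pvMapWorst
        rw [PySem.Dict.items_insert_of_contains _ _ hc]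
        rw [List.map_map]
        apply List.map_congr_left
        intro p hp
        by_cases hpk : p.1 = pvNorm r
        · obtain ⟨a, b⟩ := p
          simp only at hpk
          have hpe : g.get? a = some b := PySem.Dict.get?_of_mem_items g hp h1
          rw [hpk, hg] at hpe
          simp only [Option.some.injEq] at hpe
          simp [hpk, ← hpe, pvWorstOf_append ls _ hls, c]
        · simp [hpk]

theorem pvMain (recs : List (List (String × String))) :
    ∀ g : PySem.Dict String (List String), g.keys.Nodup → (∀ p ∈ g.items, p.2 ≠ []) →
      recs.foldl pvStepA (pvMapWorst g) = pvMapWorst (recs.foldl pvStepG g) := by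
  induction recs with
  | nil => intro g _ _; rfl
  | cons r rest ih =>
    intro g h1 h2
    simp only [List.foldl_cons]
    rw [pvStep_comm g r h1 h2]
    exact ih _ (pvStepG_nodup g r h1) (pvStepG_ne g r h2)

theorem pvInv (recs : List (List (String × String))) :
    ∀ g : PySem.Dict String (List String), g.keys.Nodup → (∀ p ∈ g.items, p.2 ≠ []) →
      (recs.foldl pvStepG g).keys.Nodup ∧ (∀ p ∈ (recs.foldl pvStepG g).items, p.2 ≠ []) := by
  induction recs with
  | nil => intro g h1 h2; exact ⟨h1, h2⟩
  | cons r rest ih =>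
    intro g h1 h2
    simp only [List.foldl_cons]
    exact ih _ (pvStepG_nodup g r h1) (pvStepG_ne g r h2)

-- ===== VERDICT (by name: the statement is the Claim_ definition above) =====
theorem river_alert_levels_py_spec : Claim_equal_river_alert_levels_py := by
  intro recs _ _
  unfold Spec_river_alert_levels_py river_alert_levels_py river_alert_levels_py_alt
  have hne : ∀ p ∈ (PySem.Dict.empty : PySem.Dict String (List String)).items, p.2 ≠ [] := by
    intro p hp
    simp [PySem.Dict.empty] at hp
  have h0 : pvMapWorst PySem.Dict.empty = PySem.Dict.empty := rfl
  have hmain := pvMain recs PySem.Dict.empty PySem.Dict.nodup_keys_empty hne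
  rw [h0] at hmain
  have hinv := pvInv recs PySem.Dict.empty PySem.Dict.nodup_keys_empty hne
  have hfresh := PySem.Dict.items_foldl_insert_fresh
      (recs.foldl pvStepG PySem.Dict.empty).items (fun p => p.1) (fun p => pvWorstOf p.2)
      PySem.Dict.empty (fun a _ => PySem.Dict.contains_empty _)
      (by simpa [PySem.Dict.keys] using hinv.1)
  rw [hmain, hfresh]
  simp [pvMapWorst, PySem.Dict.empty]
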